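-- pv_equiv track=rewrite | github.com/MrBrantCode/unitest_baseline | mut_generate/mist_train_cf/cf_93048/solution.py | delete_every_third_character
-- ===== SOURCE A (Python) =====
-- def delete_every_third_character(string):
--     chars = list(string)
--     writeIndex = 0
--     readIndex = 0
--
--     while readIndex < len(chars):
--         if (readIndex + 1) % 3 != 0:
--             chars[writeIndex] = chars[readIndex]
--             writeIndex += 1
--         readIndex += 1
--
--     return ''.join(chars[:writeIndex])
-- ===== SOURCE B (Python) =====
-- def delete_every_third_character(string):
--     chars = list(string)
--     output = []
--     for i in range(0, len(chars), 3):
--         output.extend(chars[i:i + 2])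
--     return ''.join(output)
-- ===== Notes on version B (the rewrite author's own statement) =====
-- stated objective: simpler
-- what changed: Replaces A's in-place two-index read/write compaction with a mod-3 test per character by a stride-3 traversal that extends the output with the first two characters of each group of three.
import Mathlib
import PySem

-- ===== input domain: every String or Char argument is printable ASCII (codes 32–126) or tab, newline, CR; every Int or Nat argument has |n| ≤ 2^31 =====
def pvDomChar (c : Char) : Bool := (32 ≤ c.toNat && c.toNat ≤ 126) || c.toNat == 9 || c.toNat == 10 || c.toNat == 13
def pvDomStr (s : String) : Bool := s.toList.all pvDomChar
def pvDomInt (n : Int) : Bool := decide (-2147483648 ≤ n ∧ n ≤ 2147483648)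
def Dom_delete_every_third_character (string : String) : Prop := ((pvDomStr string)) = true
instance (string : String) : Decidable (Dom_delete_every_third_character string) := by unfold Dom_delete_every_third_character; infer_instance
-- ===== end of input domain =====

-- B keeps the first two characters of each stride-3 group instead of A's in-place
-- read/write compaction with a mod-3 test; objective: simpler.

-- ===== PORT A =====
-- the while loop of A: state is the mutable char list, writeIndex, readIndex
def pvLoopA (chars : List Char) (w r : Nat) : List Char :=
  if h : r < chars.length then
    if (r + 1) % 3 ≠ 0 then
      pvLoopA (chars.set w (chars[r]'h)) (w + 1) (r + 1)
    else
      pvLoopA chars w (r + 1)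
  else
    chars.take w
termination_by chars.length - r
decreasing_by
  · simp only [List.length_set]; omega
  · omega

def delete_every_third_character (string : String) : String :=
  String.mk (pvLoopA string.toList 0 0)

-- ===== PORT B =====
def delete_every_third_character_alt (string : String) : String :=
  let chars := string.toList
  let output := (PySem.List.pyRange 0 (chars.length : Int) 3).foldl
    (fun acc i => acc ++ PySem.List.slice chars (some i) (some (i + 2))) []
  String.mk output

-- ===== PRECONDITION & SPEC =====
def Spec_delete_every_third_character (string : String) (out : String) : Prop := out = delete_every_third_character_alt string
instance (string : String) (out : String) : Decidable (Spec_delete_every_third_character string out) := by unfold Spec_delete_every_third_character; infer_instance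

-- ===== CLAIM (what is proved, stated in full; the proofs are below) =====
def Claim_equal_delete_every_third_character : Prop := ∀ (string : String), Dom_delete_every_third_character string → Spec_delete_every_third_character string (delete_every_third_character string)

-- ===== LEMMAS AND PROOFS =====

-- the common specification: keep chars whose (0-based) absolute index r has (r+1) % 3 ≠ 0
def keep3 (r : Nat) : List Char → List Char
  | [] => []
  | c :: t => if (r + 1) % 3 ≠ 0 then c :: keep3 (r + 1) t else keep3 (r + 1) t

theorem pyRange3_nil (a b : Int) (h : b ≤ a) : PySem.List.pyRange a b 3 = [] := by
  rw [PySem.List.pyRange_of_pos a b (by norm_num)]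
  simp [show ¬ a < b by omega]

theorem pyRange3_cons (a b : Int) (h : a < b) :
    PySem.List.pyRange a b 3 = a :: PySem.List.pyRange (a + 3) b 3 := by
  rw [PySem.List.pyRange_of_pos a b (by norm_num),
      PySem.List.pyRange_of_pos (a + 3) b (by norm_num)]
  have hN : ((b - a + 3 - 1) / 3).toNat =
      (if a + 3 < b then ((b - (a + 3) + 3 - 1) / 3).toNat else 0) + 1 := by
    by_cases h3 : a + 3 < b
    · simp only [h3, if_true]
      have hd : (0:Int) ≤ b - (a + 3) + 3 - 1 := by omega
      have : b - a + 3 - 1 = (b - (a + 3) + 3 - 1) + 1 * 3 := by ring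
      rw [this, Int.add_mul_ediv_right _ _ (by norm_num : (3:Int) ≠ 0)]
      have : (0:Int) ≤ (b - (a + 3) + 3 - 1) / 3 := Int.ediv_nonneg hd (by norm_num)
      omega
    · simp only [h3, if_false]
      have h1 : (1:Int) ≤ b - a := by omega
      have h2 : b - a ≤ 3 := by omega
      have : (b - a + 3 - 1) / 3 = 1 := by
        interval_cases h : (b - a) <;> decide
      rw [this]; rfl
  rw [if_pos h, hN, List.range_succ_eq_map]
  simp only [List.map_cons, List.map_map]
  congr 1
  · norm_num
  · apply List.map_congr_left
    intro k _
    simp only [Function.comp_apply]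
    push_cast
    ring

theorem keep3_chunk (i : Nat) (hi : i % 3 = 0) (l : List Char) :
    keep3 i l = l.take 2 ++ keep3 (i + 3) (l.drop 3) := by
  have h1 : (i + 1) % 3 ≠ 0 := by omega
  have h2 : (i + 1 + 1) % 3 ≠ 0 := by omega
  have h3 : (i + 1 + 1 + 1) % 3 = 0 := by omega
  match l with
  | [] => simp [keep3]
  | [a] => simp [keep3, h1]
  | [a, b] => simp [keep3, h1, h2]
  | a :: b :: c :: t =>
      simp only [keep3, h1, h2, h3, if_true, if_false, ne_eq, not_true_eq_false,
        not_false_eq_true, List.take, List.drop]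
      have : i + 1 + 1 + 1 = i + 3 := by omega
      simp [this]

-- A's loop computes keep3: pre is the output written so far, garbage the overwritten zone
theorem pvLoopA_eq (rest : List Char) : ∀ (pre garbage : List Char),
    pvLoopA (pre ++ garbage ++ rest) pre.length (pre.length + garbage.length) =
      pre ++ keep3 (pre.length + garbage.length) rest := by
  induction rest with
  | nil =>
      intro pre garbage
      rw [pvLoopA]
      simp [keep3]
  | cons c t ih =>
      intro pre garbage
      rw [pvLoopA]
      have hlen : pre.length + garbage.length < (pre ++ garbage ++ c :: t).length := by
        simp
      rw [dif_pos hlen]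
      have hget : (pre ++ garbage ++ c :: t)[pre.length + garbage.length]'hlen = c := by
        rw [List.getElem_append_right (by simp)]
        simp
      by_cases hm : (pre.length + garbage.length + 1) % 3 ≠ 0
      · rw [if_pos hm, hget]
        match garbage, hm with
        | [], hm =>
            have hset : (pre ++ [] ++ c :: t).set pre.length c =
                (pre ++ [c]) ++ [] ++ t := by
              simp only [List.append_nil]
              rw [List.set_append_right _ _ (le_refl _)]
              simp
            rw [hset]
            have key := ih (pre ++ [c]) []
            simp only [List.append_nil, List.length_nil, Nat.add_zero,
              List.length_append, List.length_cons] at key hm ⊢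
            rw [key]
            simp [keep3, hm]
        | g :: gs, hm =>
            have hset : (pre ++ g :: gs ++ c :: t).set pre.length c =
                (pre ++ [c]) ++ (gs ++ [c]) ++ t := by
              have hre : pre ++ g :: gs ++ c :: t = pre ++ (g :: (gs ++ c :: t)) := by simp
              rw [hre, List.set_append_right _ _ (le_refl _)]
              simp
            rw [hset]
            have key := ih (pre ++ [c]) (gs ++ [c])
            simp only [List.length_append, List.length_cons, List.length_nil] at key hm ⊢
            rw [show pre.length + (gs.length + 1) + 1 = pre.length + 1 + (gs.length + 1) from
              by omega, key]
            rw [show pre.length + 1 + (gs.length + 1) = pre.length + (gs.length + 1) + 1 from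
              by omega]
            simp [keep3, hm]
      · rw [if_neg hm]
        simp only [ne_eq, not_not] at hm
        have hre : pre ++ garbage ++ c :: t = pre ++ (garbage ++ [c]) ++ t := by simp
        have key := ih pre (garbage ++ [c])
        simp only [List.length_append, List.length_cons, List.length_nil] at key
        rw [hre, show pre.length + garbage.length + 1 = pre.length + (garbage.length + 1) from
          by omega, key]
        rw [show pre.length + (garbage.length + 1) = pre.length + garbage.length + 1 from
          by omega]
        simp [keep3, hm]

-- B's fold computes keep3
theorem foldB_eq (chars : List Char) (i : Nat) (acc : List Char) (hi : i % 3 = 0) :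
    (PySem.List.pyRange (i : Int) (chars.length : Int) 3).foldl
      (fun acc j => acc ++ PySem.List.slice chars (some j) (some (j + 2))) acc =
      acc ++ keep3 i (chars.drop i) := by
  by_cases h : i < chars.length
  · rw [pyRange3_cons _ _ (by exact_mod_cast h)]
    simp only [List.foldl_cons]
    have hs : PySem.List.slice chars (some (i : Int)) (some ((i : Int) + 2)) =
        (chars.drop i).take 2 := by
      have := PySem.List.slice_natCast_add chars i 2
      simpa using this
    have h3 : ((i : Int) + 3) = ((i + 3 : Nat) : Int) := by push_cast; ring
    rw [hs, h3, foldB_eq chars (i + 3) _ (by omega)]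
    rw [keep3_chunk i hi (chars.drop i), List.drop_drop]
    simp [List.append_assoc]
  · rw [pyRange3_nil _ _ (by exact_mod_cast Nat.le_of_not_lt h)]
    rw [List.drop_of_length_le (by omega)]
    simp [keep3]
termination_by chars.length - i
decreasing_by omega

-- ===== VERDICT (by name: the statement is the Claim_ definition above) =====
theorem delete_every_third_character_spec : Claim_equal_delete_every_third_character := by
  intro s _
  unfold Spec_delete_every_third_character
  have hA := pvLoopA_eq s.toList [] []
  simp only [List.nil_append, List.length_nil, Nat.add_zero] at hA
  have hB := foldB_eq s.toList 0 [] (by norm_num)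
  simp only [List.drop_zero, List.nil_append, Int.natCast_zero] at hB
  show String.mk (pvLoopA s.toList 0 0) =
    String.mk ((PySem.List.pyRange 0 (s.toList.length : Int) 3).foldl
      (fun acc i => acc ++ PySem.List.slice s.toList (some i) (some (i + 2))) [])
  rw [hA, hB]
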